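-- pv_equiv track=rewrite | github.com/snootfef/MakeUoft-2024 | recog.py | isWaving
-- ===== SOURCE A (Python) =====
-- def isWaving(directionHistory):
--     direction = 0
--     count = 0
--     for d in directionHistory:
--         if d[0] == "":
--             continue
--         if d[0] == "left" and d[1] and direction != -1:
--             direction = -1
--             count += 1
--         elif d[0] == "right" and d[1] and direction != 1:
--             direction = 1
--             count += 1
--     return count >= 3
-- ===== SOURCE B (Python) =====
-- def isWaving(directionHistory):
--     # filter-then-count-runs decomposition: extract signed directions, then count alternations
--     signs = []
--     for d in directionHistory:
--         if d[0] == "left" and d[1]: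
--             signs.append(-1)
--         elif d[0] == "right" and d[1]:
--             signs.append(1)
--     prev = 0
--     changes = 0
--     for s in signs:
--         if s != prev:
--             changes += 1
--             prev = s
--     return changes >= 3
-- ===== Notes on version B (the rewrite author's own statement) =====
-- stated objective: alternative
-- what changed: Replaces the fused direction/count state machine with a two-phase decomposition: first filter the history to a list of signed directions (-1/left, +1/right), then count adjacent changes in that list starting from sentinel 0.
import Mathlib
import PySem

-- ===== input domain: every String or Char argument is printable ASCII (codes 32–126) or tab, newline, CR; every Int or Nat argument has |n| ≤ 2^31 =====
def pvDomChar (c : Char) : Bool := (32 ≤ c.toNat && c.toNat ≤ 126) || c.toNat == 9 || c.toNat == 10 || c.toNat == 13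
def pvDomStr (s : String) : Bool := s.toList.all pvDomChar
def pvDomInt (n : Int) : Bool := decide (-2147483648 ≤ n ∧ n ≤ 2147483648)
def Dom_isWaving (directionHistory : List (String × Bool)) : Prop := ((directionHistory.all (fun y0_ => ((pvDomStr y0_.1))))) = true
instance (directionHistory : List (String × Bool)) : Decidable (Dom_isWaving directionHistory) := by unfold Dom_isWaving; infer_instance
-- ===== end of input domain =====

-- B replaces A's fused state-machine loop by a filter-then-count-adjacent-changes decomposition (alternative, same cost).


-- ===== PORT A =====
-- one fused pass: state (direction, count), updated exactly as in the Python loop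
def isWavingStepA (st : Int × Int) (d : String × Bool) : Int × Int :=
  if d.1 == "" then st
  else if d.1 == "left" && d.2 && !(st.1 == -1) then (-1, st.2 + 1)
  else if d.1 == "right" && d.2 && !(st.1 == 1) then (1, st.2 + 1)
  else st

def isWaving (directionHistory : List (String × Bool)) : Bool :=
  decide (3 ≤ (directionHistory.foldl isWavingStepA ((0 : Int), (0 : Int))).2)

-- ===== PORT B =====
-- phase 1: the sign list (-1 for truthy left, +1 for truthy right, others dropped)
def isWavingSign (d : String × Bool) : Option Int :=
  if d.1 == "left" && d.2 then some (-1)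
  else if d.1 == "right" && d.2 then some 1
  else none

-- phase 2: count changes against a running previous value starting at 0
def isWavingStepB (st : Int × Int) (s : Int) : Int × Int :=
  if s ≠ st.1 then (s, st.2 + 1) else st

def isWaving_alt (directionHistory : List (String × Bool)) : Bool :=
  decide (3 ≤ ((directionHistory.filterMap isWavingSign).foldl isWavingStepB ((0 : Int), (0 : Int))).2)

-- ===== PRECONDITION & SPEC =====
def Spec_isWaving (directionHistory : List (String × Bool)) (out : Bool) : Prop := out = isWaving_alt directionHistory
instance (directionHistory : List (String × Bool)) (out : Bool) : Decidable (Spec_isWaving directionHistory out) := by unfold Spec_isWaving; infer_instance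

-- ===== CLAIM (what is proved, stated in full; the proofs are below) =====
def Claim_equal_isWaving : Prop := ∀ (directionHistory : List (String × Bool)), Dom_isWaving directionHistory → Spec_isWaving directionHistory (isWaving directionHistory)

-- ===== LEMMAS AND PROOFS =====
theorem isWaving_fold_eq (l : List (String × Bool)) (st : Int × Int) :
    l.foldl isWavingStepA st = (l.filterMap isWavingSign).foldl isWavingStepB st := by
  induction l generalizing st with
  | nil => rfl
  | cons d rest ih =>
    by_cases h1 : d.1 = "left" ∧ d.2 = true
    · have hsign : isWavingSign d = some (-1) := by simp [isWavingSign, h1.1, h1.2]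
      have hstep : isWavingStepA st d = isWavingStepB st (-1) := by
        by_cases hd : st.1 = -1
        · simp [isWavingStepA, isWavingStepB, h1.1, h1.2, hd]
        · simp [isWavingStepA, isWavingStepB, h1.1, h1.2, hd]
          intro h; exact absurd h.symm hd
      simp [List.foldl_cons, hsign, hstep, ih]
    · by_cases h2 : d.1 = "right" ∧ d.2 = true
      · have hsign : isWavingSign d = some 1 := by
          simp [isWavingSign, h2.1, h2.2]
        have hstep : isWavingStepA st d = isWavingStepB st 1 := by
          by_cases hd : st.1 = 1
          · simp [isWavingStepA, isWavingStepB, h2.1, h2.2, hd]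
          · simp [isWavingStepA, isWavingStepB, h2.1, h2.2, hd]
            intro h; exact absurd h.symm hd
        simp [List.foldl_cons, hsign, hstep, ih]
      · -- d contributes nothing to either pass
        have hsign : isWavingSign d = none := by
          simp only [isWavingSign]
          by_cases hl : d.1 = "left" <;> by_cases hb : d.2 = true <;>
            by_cases hr : d.1 = "right" <;> simp_all
        have hstep : isWavingStepA st d = st := by
          simp only [isWavingStepA]
          by_cases he : d.1 = "" <;> by_cases hl : d.1 = "left" <;>
            by_cases hb : d.2 = true <;> by_cases hr : d.1 = "right" <;> simp_all
        simp [List.foldl_cons, hsign, hstep, ih]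

-- ===== VERDICT (by name: the statement is the Claim_ definition above) =====
theorem isWaving_spec : Claim_equal_isWaving := by
  intro l _
  unfold Spec_isWaving isWaving isWaving_alt
  rw [isWaving_fold_eq]
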